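-- pv_equiv track=rewrite | github.com/akash-kumar5/Lexx-LegalAI | server/routes/summary.py | fine_grained_paragraph_chunker
-- ===== SOURCE A (Python) =====
-- from typing import List, Tuple
--
-- def fine_grained_paragraph_chunker(text: str, max_chunk_words: int = 200) -> List[str]:
--     """
--     Split by paragraph boundaries into chunks ~max_chunk_words.
--     """
--     paragraphs = [p.strip() for p in text.split("\n\n") if p.strip()]
--     chunks = []
--     current_chunk = ""
--
--     for para in paragraphs:
--         # If adding this paragraph stays within limit, append
--         if len((current_chunk + " " + para).split()) <= max_chunk_words:
--             current_chunk = (current_chunk + " " + para).strip()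
--         else:
--             if current_chunk:
--                 chunks.append(current_chunk.strip())
--             # if paragraph itself is huge, break it into smaller slices
--             if len(para.split()) <= max_chunk_words:
--                 current_chunk = para
--             else:
--                 words = para.split()
--                 i = 0
--                 while i < len(words):
--                     slice_words = words[i : i + max_chunk_words]
--                     chunks.append(" ".join(slice_words))
--                     i += max_chunk_words
--                 current_chunk = ""
--     if current_chunk:
--         chunks.append(current_chunk.strip())
--     return chunks
-- ===== SOURCE B (Python) =====
-- def fine_grained_paragraph_chunker(text: str, max_chunk_words: int = 200):
--     """
--     Plan-then-render: pass 1 strips/tokenizes paragraphs and computes, on the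
--     word COUNTS alone, a plan of chunk boundaries (grouped paragraph ranges and
--     oversized-paragraph slice ops); pass 2 materializes the plan into strings.
--     """
--     paras = [p for p in (q.strip() for q in text.split("\n\n")) if p]
--     counts = [len(p.split()) for p in paras]
--
--     # pass 1: boundary plan over the numeric summary only
--     plan = []          # ("group", start, stop) over paras, or ("slices", k)
--     start = None       # start index of the open paragraph group
--     total = 0          # word count of the open group
--     for k, n in enumerate(counts):
--         if n > max_chunk_words:
--             if start is not None:
--                 plan.append(("group", start, k))
--                 start = None
--             plan.append(("slices", k))
--             total = 0
--         elif start is None: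
--             start, total = k, n
--         elif total + n <= max_chunk_words:
--             total += n
--         else:
--             plan.append(("group", start, k))
--             start, total = k, n
--     if start is not None:
--         plan.append(("group", start, len(paras)))
--
--     # pass 2: materialize
--     out = []
--     for op in plan:
--         if op[0] == "group":
--             out.append(" ".join(paras[op[1]:op[2]]))
--         else:
--             words = paras[op[1]].split()
--             for j in range(0, len(words), max_chunk_words):
--                 out.append(" ".join(words[j:j + max_chunk_words]))
--     return out
-- ===== Notes on version B (the rewrite author's own statement) =====
-- stated objective: alternative
-- what changed: B is a two-stage plan-then-render algorithm: a first pass over the numeric word counts alone computes a plan of chunk boundaries (paragraph index ranges and oversized-slice ops), and a second pass materializes the plan into strings; A interleaves string building with the scan, re-concatenating and re-splitting the growing chunk for every paragraph.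
import Mathlib
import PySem

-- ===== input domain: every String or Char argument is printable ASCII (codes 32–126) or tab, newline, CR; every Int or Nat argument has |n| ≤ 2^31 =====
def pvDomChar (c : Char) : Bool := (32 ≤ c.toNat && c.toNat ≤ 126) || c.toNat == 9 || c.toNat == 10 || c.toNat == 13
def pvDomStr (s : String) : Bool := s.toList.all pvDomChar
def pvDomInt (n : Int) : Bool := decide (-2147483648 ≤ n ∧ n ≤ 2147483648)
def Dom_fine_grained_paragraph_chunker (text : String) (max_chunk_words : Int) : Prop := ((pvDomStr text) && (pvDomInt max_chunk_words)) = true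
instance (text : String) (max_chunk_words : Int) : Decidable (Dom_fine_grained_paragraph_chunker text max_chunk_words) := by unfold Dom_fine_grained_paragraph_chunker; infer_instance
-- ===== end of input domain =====

-- B replaces A's interleaved scan by a two-stage plan-then-render algorithm (plan chunk
-- boundaries on the word counts alone, then materialize the strings); A = B is proved for
-- max_chunk_words ≥ 1.

-- ===== PORT A =====
-- the inner 'while i < len(words): chunks.append(" ".join(words[i:i+max])); i += max' loop;
-- the '0 < max' conjunct is only a totality guard: for max ≤ 0 Python's while loop never
-- advances (diverges), and such inputs are excluded by Pre_.
def pvSliceLoopA (max : Int) (words : List (List Char)) (i : Nat) (chunks : List (List Char)) :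
    List (List Char) :=
  if h : i < words.length ∧ 0 < max then
    pvSliceLoopA max words (i + max.toNat)
      (chunks ++ [PySem.Chars.join [' '] (PySem.List.slice words (some (i : Int)) (some ((i : Int) + max)))])
  else chunks
  termination_by words.length - i
  decreasing_by omega

-- one iteration of A's 'for para in paragraphs' loop; state = (chunks, current_chunk)
def pvStepA (max : Int) (st : List (List Char) × List Char) (para : List Char) :
    List (List Char) × List Char :=
  let chunks := st.1
  let cur := st.2
  if ((PySem.Chars.split₀ (cur ++ ' ' :: para)).length : Int) ≤ max then
    (chunks, PySem.Chars.strip (cur ++ ' ' :: para))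
  else
    let chunks := if cur.isEmpty then chunks else chunks ++ [PySem.Chars.strip cur]
    if ((PySem.Chars.split₀ para).length : Int) ≤ max then (chunks, para)
    else
      let words := PySem.Chars.split₀ para
      (pvSliceLoopA max words 0 chunks, ([] : List Char))

def fine_grained_paragraph_chunker (text : String) (max_chunk_words : Int) : List String :=
  let paragraphs :=
    ((PySem.Chars.splitOn text.toList ['\n', '\n']).filter
        (fun p => !(PySem.Chars.strip p).isEmpty)).map PySem.Chars.strip
  let st := paragraphs.foldl (pvStepA max_chunk_words) ([], [])
  let chunks := if st.2.isEmpty then st.1 else st.1 ++ [PySem.Chars.strip st.2]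
  chunks.map String.mk

-- ===== PORT B =====
-- a plan entry: ("group", start, stop) over the paragraph list, or ("slices", k)
inductive PvOp
  | group : Int → Int → PvOp
  | slices : Int → PvOp
  deriving DecidableEq, Repr

-- one iteration of B's 'for k, n in enumerate(counts)' loop; state = (plan, start, total)
def pvStepPlan (max : Int) (st : List PvOp × Option Int × Nat) (kn : Int × Nat) :
    List PvOp × Option Int × Nat :=
  let plan := st.1
  let start := st.2.1
  let total := st.2.2
  let k := kn.1
  let n := kn.2
  if (n : Int) > max then
    let plan := match start with
      | some s => plan ++ [PvOp.group s k]
      | none => plan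
    (plan ++ [PvOp.slices k], none, 0)
  else match start with
    | none => (plan, some k, n)
    | some s =>
      if ((total + n : Nat) : Int) ≤ max then (plan, some s, total + n)
      else (plan ++ [PvOp.group s k], some k, n)

-- one iteration of B's materialize loop 'for op in plan'
def pvMatStep (max : Int) (paras : List (List Char)) (out : List (List Char)) (op : PvOp) :
    List (List Char) :=
  match op with
  | PvOp.group s e => out ++ [PySem.Chars.join [' '] (PySem.List.slice paras (some s) (some e))]
  | PvOp.slices k =>
      let words := PySem.Chars.split₀ (PySem.List.pyGetD paras k [])
      (PySem.List.pyRange 0 (words.length : Int) max).foldl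
        (fun o j => o ++ [PySem.Chars.join [' '] (PySem.List.slice words (some j) (some (j + max)))]) out

def fine_grained_paragraph_chunker_alt (text : String) (max_chunk_words : Int) : List String :=
  let paras := ((PySem.Chars.splitOn text.toList ['\n', '\n']).map PySem.Chars.strip).filter
      (fun p => !p.isEmpty)
  let counts := paras.map (fun p => (PySem.Chars.split₀ p).length)
  let st := (PySem.List.enumerate counts 0).foldl (pvStepPlan max_chunk_words) ([], none, 0)
  let plan := match st.2.1 with
    | some s => st.1 ++ [PvOp.group s (paras.length : Int)]
    | none => st.1
  (plan.foldl (pvMatStep max_chunk_words paras) []).map String.mk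

-- ===== PRECONDITION & SPEC =====
-- Pre_ excludes exactly the inputs on which A never returns: max_chunk_words ≤ 0 combined with
-- a text containing a non-whitespace paragraph, where A's word-slicing while loop never advances
-- (i never grows), so A diverges.
def Pre_fine_grained_paragraph_chunker (text : String) (max_chunk_words : Int) : Prop :=
  1 ≤ max_chunk_words ∨
    (PySem.Chars.splitOn text.toList ['\n', '\n']).filter
      (fun p => !(PySem.Chars.strip p).isEmpty) = []
instance (text : String) (max_chunk_words : Int) : Decidable (Pre_fine_grained_paragraph_chunker text max_chunk_words) := by unfold Pre_fine_grained_paragraph_chunker; infer_instance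

def pvWitness_fine_grained_paragraph_chunker : String × Int := ("a b c\n\nd e", 2)

def Spec_fine_grained_paragraph_chunker (text : String) (max_chunk_words : Int) (out : List String) : Prop := out = fine_grained_paragraph_chunker_alt text max_chunk_words
instance (text : String) (max_chunk_words : Int) (out : List String) : Decidable (Spec_fine_grained_paragraph_chunker text max_chunk_words out) := by unfold Spec_fine_grained_paragraph_chunker; infer_instance

-- ===== CLAIM (what is proved, stated in full; the proofs are below) =====
def Claim_equal_fine_grained_paragraph_chunker : Prop := ∀ (text : String) (max_chunk_words : Int), Dom_fine_grained_paragraph_chunker text max_chunk_words → Pre_fine_grained_paragraph_chunker text max_chunk_words → Spec_fine_grained_paragraph_chunker text max_chunk_words (fine_grained_paragraph_chunker text max_chunk_words)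

-- ===== LEMMAS AND PROOFS =====

-- split₀'s worker with a non-empty accumulator
theorem pvGoAcc (s : List Char) : ∀ (cur : List Char) (acc : List (List Char)),
    PySem.Chars.split₀.go s cur acc = acc.reverse ++ PySem.Chars.split₀.go s cur [] := by
  induction s with
  | nil =>
    intro cur acc
    by_cases hc : cur.isEmpty <;> simp [PySem.Chars.split₀.go, hc]
  | cons c rest ih =>
    intro cur acc
    by_cases hs : PySem.Chars.isspace c
    · by_cases hc : cur.isEmpty
      · simp only [PySem.Chars.split₀.go, hs, hc, if_pos, if_true]
        rw [ih [] acc]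
      · simp only [PySem.Chars.split₀.go, hs, hc, if_true, if_false, Bool.false_eq_true]
        rw [ih [] (cur.reverse :: acc), ih [] [cur.reverse]]
        simp
    · simp only [PySem.Chars.split₀.go, hs, Bool.false_eq_true, if_false]
      exact ih (c :: cur) acc

-- processing 'a ++ ' ' :: b' flushes the word in progress exactly at the ' '
theorem pvGoSpace (b : List Char) : ∀ (a cur : List Char) (acc : List (List Char)),
    PySem.Chars.split₀.go (a ++ ' ' :: b) cur acc =
      PySem.Chars.split₀.go a cur acc ++ PySem.Chars.split₀.go b [] [] := by
  intro a
  induction a with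
  | nil =>
    intro cur acc
    by_cases hc : cur.isEmpty
    · simp only [List.nil_append, PySem.Chars.split₀.go, hc, if_true,
        show PySem.Chars.isspace ' ' = true from rfl]
      exact pvGoAcc b [] acc
    · simp only [List.nil_append, PySem.Chars.split₀.go, hc, Bool.false_eq_true, if_false,
        show PySem.Chars.isspace ' ' = true from rfl]
      rw [pvGoAcc b [] (cur.reverse :: acc)]
      simp [PySem.Chars.split₀.go, hc]
  | cons c rest ih =>
    intro cur acc
    by_cases hs : PySem.Chars.isspace c
    · by_cases hc : cur.isEmpty <;>
        simp only [List.cons_append, PySem.Chars.split₀.go, hs, hc, if_true, Bool.false_eq_true,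
          if_false] <;> exact ih _ _
    · simp only [List.cons_append, PySem.Chars.split₀.go, hs, Bool.false_eq_true, if_false]
      exact ih _ _

-- the word-count identity behind B's counts list
theorem pvSplitAppendSpace (a b : List Char) :
    PySem.Chars.split₀ (a ++ ' ' :: b) = PySem.Chars.split₀ a ++ PySem.Chars.split₀ b := by
  unfold PySem.Chars.split₀
  exact pvGoSpace b a [] []

def pvGood (s : List Char) : Prop :=
  PySem.Chars.lstrip s = s ∧ PySem.Chars.rstrip s = s

theorem pvStripOfGood {s : List Char} (h : pvGood s) : PySem.Chars.strip s = s := by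
  unfold PySem.Chars.strip
  rw [h.1, h.2]

theorem pvDropWhileEqSelfOfPrefix {p : Char → Bool} {l l' : List Char}
    (h : List.dropWhile p l = l) (hpre : l' <+: l) : List.dropWhile p l' = l' := by
  cases l' with
  | nil => rfl
  | cons c t =>
    obtain ⟨rest, rfl⟩ := hpre
    have hpc : p c = false := by
      by_contra hpc
      have hpc' : p c = true := by simpa using hpc
      have h2 : List.dropWhile p (t ++ rest) = c :: (t ++ rest) := by
        simpa [hpc'] using h
      have hlen := congrArg List.length h2
      have hle := List.length_dropWhile_le p (t ++ rest)
      simp only [List.length_cons] at hlen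
      omega
    simp [List.dropWhile_cons, hpc]

theorem pvGoodStrip (x : List Char) : pvGood (PySem.Chars.strip x) := by
  unfold PySem.Chars.strip PySem.Chars.rstrip PySem.Chars.lstrip
  constructor
  · show List.dropWhile _ _ = _
    apply pvDropWhileEqSelfOfPrefix (l := List.dropWhile PySem.Chars.isspace x)
    · exact List.dropWhile_idempotent ..
    · have := List.dropWhile_suffix (l := (List.dropWhile PySem.Chars.isspace x).reverse)
        PySem.Chars.isspace
      exact List.reverse_suffix.mp (by simpa using this)
  · show PySem.Chars.rstrip _ = _
    unfold PySem.Chars.rstrip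
    rw [List.reverse_reverse, List.dropWhile_idempotent]

theorem pvStripSpaceCons {b : List Char} (hb : pvGood b) :
    PySem.Chars.strip (' ' :: b) = b := by
  unfold PySem.Chars.strip PySem.Chars.lstrip
  rw [List.dropWhile_cons]
  simp only [show PySem.Chars.isspace ' ' = true from rfl, if_true]
  show PySem.Chars.rstrip (PySem.Chars.lstrip b) = b
  rw [hb.1, hb.2]

theorem pvStripGlue {a b : List Char} (ha : pvGood a) (hna : a ≠ []) (hb : pvGood b) (hnb : b ≠ []) :
    PySem.Chars.strip (a ++ ' ' :: b) = a ++ ' ' :: b := by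
  have hrb : List.dropWhile PySem.Chars.isspace b.reverse = b.reverse := by
    have := hb.2
    unfold PySem.Chars.rstrip at this
    have := congrArg List.reverse this
    simpa using this
  unfold PySem.Chars.strip PySem.Chars.lstrip PySem.Chars.rstrip
  rw [List.dropWhile_append]
  have ha1 : List.dropWhile PySem.Chars.isspace a = a := ha.1
  rw [ha1]
  simp only [List.isEmpty_iff, hna, if_false]
  rw [List.reverse_append, List.reverse_cons, List.append_assoc, List.dropWhile_append, hrb]
  simp only [List.isEmpty_iff, List.reverse_eq_nil_iff, hnb, if_false]
  simp

theorem pvJoinAppendSingleton (ps : List (List Char)) (p : List Char) (h : ps ≠ []) :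
    PySem.Chars.join [' '] (ps ++ [p]) = PySem.Chars.join [' '] ps ++ ' ' :: p := by
  induction ps with
  | nil => exact absurd rfl h
  | cons a rest ih =>
    cases rest with
    | nil => simp [PySem.Chars.join_cons_cons, PySem.Chars.join_singleton]
    | cons b t =>
      have ih' := ih (by simp)
      simp only [List.cons_append] at ih' ⊢
      rw [PySem.Chars.join_cons_cons, ih', PySem.Chars.join_cons_cons]
      simp

theorem pvCnt (a b s : Int) (hs : 0 < s) (hab : a < b) :
    ((b - a + s - 1) / s).toNat
      = (if a + s < b then ((b - (a + s) + s - 1) / s).toNat else 0) + 1 := by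
  have key : (b - a + s - 1) / s = (b - a - 1) / s + 1 := by
    have h1 := Int.add_mul_ediv_right (b - a - 1) 1 (show s ≠ 0 by omega)
    have e : b - a - 1 + 1 * s = b - a + s - 1 := by ring
    rw [e] at h1; linarith [h1]
  have hnn : 0 ≤ (b - a - 1) / s := Int.ediv_nonneg (by omega) (by omega)
  rw [show b - (a + s) + s - 1 = b - a - 1 by ring]
  by_cases h : a + s < b
  · rw [if_pos h, key]; omega
  · rw [if_neg h, key, Int.ediv_eq_zero_of_lt (by omega) (by omega)]
    decide

theorem pvPyRangeConsPos {a b s : Int} (hs : 0 < s) (hab : a < b) :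
    PySem.List.pyRange a b s = a :: PySem.List.pyRange (a + s) b s := by
  rw [PySem.List.pyRange_of_pos a b hs, PySem.List.pyRange_of_pos (a + s) b hs, if_pos hab,
    pvCnt a b s hs hab, List.range_succ_eq_map]
  simp only [List.map_cons, List.map_map, Nat.cast_zero, mul_zero, add_zero]
  congr 1
  refine List.map_congr_left fun k _ => ?_
  simp only [Function.comp_apply]
  push_cast
  ring

theorem pvPyRangeNilPos {a b s : Int} (hs : 0 < s) (hab : b ≤ a) :
    PySem.List.pyRange a b s = [] := by
  rw [PySem.List.pyRange_of_pos a b hs, if_neg (by omega)]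
  simp

-- A's slicing while loop = the slice chunks, as a map over the step-max range
theorem pvSliceLoopEq (max : Int) (hmax : 0 < max) (words : List (List Char)) :
    ∀ (i : Nat) (chunks : List (List Char)),
      pvSliceLoopA max words i chunks =
        chunks ++ (PySem.List.pyRange (i : Int) (words.length : Int) max).map
          (fun j => PySem.Chars.join [' '] (PySem.List.slice words (some j) (some (j + max)))) := by
  suffices H : ∀ (n i : Nat), words.length - i ≤ n → ∀ chunks,
      pvSliceLoopA max words i chunks =
        chunks ++ (PySem.List.pyRange (i : Int) (words.length : Int) max).map
          (fun j => PySem.Chars.join [' '] (PySem.List.slice words (some j) (some (j + max)))) by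
    intro i chunks; exact H _ i le_rfl chunks
  intro n
  induction n with
  | zero =>
    intro i hle chunks
    have hge : words.length ≤ i := by omega
    rw [pvSliceLoopA, dif_neg (by omega), pvPyRangeNilPos hmax (by exact_mod_cast hge)]
    simp
  | succ m ih =>
    intro i hle chunks
    by_cases hi : i < words.length
    · rw [pvSliceLoopA, dif_pos ⟨hi, hmax⟩, ih (i + max.toNat) (by omega),
        pvPyRangeConsPos (a := (i : Int)) hmax (by exact_mod_cast hi)]
      have hcast : PySem.List.pyRange ((i : Int) + max) (words.length : Int) max
          = PySem.List.pyRange ((i + max.toNat : Nat) : Int) (words.length : Int) max := by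
        congr 1
        omega
      rw [hcast]
      simp
    · rw [pvSliceLoopA, dif_neg (by omega), pvPyRangeNilPos hmax (by exact_mod_cast by omega)]
      simp

-- what one plan op renders to
def pvRender (max : Int) (paras : List (List Char)) (op : PvOp) : List (List Char) :=
  match op with
  | PvOp.group s e => [PySem.Chars.join [' '] (PySem.List.slice paras (some s) (some e))]
  | PvOp.slices k =>
      let words := PySem.Chars.split₀ (PySem.List.pyGetD paras k [])
      (PySem.List.pyRange 0 (words.length : Int) max).map
        (fun j => PySem.Chars.join [' '] (PySem.List.slice words (some j) (some (j + max))))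

theorem pvMatStepEq (max : Int) (paras : List (List Char)) (out : List (List Char)) (op : PvOp) :
    pvMatStep max paras out op = out ++ pvRender max paras op := by
  cases op with
  | group s e => rfl
  | slices k =>
    simp only [pvMatStep, pvRender]
    exact PySem.List.foldl_append_singleton_eq_map ..

-- B's materialize loop = flatMap of the renderings
theorem pvMatFold (max : Int) (paras : List (List Char)) :
    ∀ (plan : List PvOp) (out : List (List Char)),
      plan.foldl (pvMatStep max paras) out = out ++ plan.flatMap (pvRender max paras) := by
  intro plan
  induction plan with
  | nil => intro out; simp
  | cons op rest ih =>
    intro out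
    rw [List.foldl_cons, ih, pvMatStepEq]
    simp

-- the state relation between A's (chunks, cur) after k paragraphs and B's (plan, start, total)
def pvInvB (max : Int) (paras : List (List Char)) (k : Nat)
    (stA : List (List Char) × List Char) (stB : List PvOp × Option Int × Nat) : Prop :=
  stA.1 = stB.1.flatMap (pvRender max paras) ∧
  match stB.2.1 with
  | none => stA.2 = [] ∧ stB.2.2 = 0
  | some s => ∃ sn : Nat, s = (sn : Int) ∧ sn < k ∧
      stA.2 = PySem.Chars.join [' '] ((paras.drop sn).take (k - sn)) ∧
      stA.2 ≠ [] ∧ pvGood stA.2 ∧ stB.2.2 = (PySem.Chars.split₀ stA.2).length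

-- what survives of the relation once the scan is over
def pvInvEnd (max : Int) (paras : List (List Char))
    (stA : List (List Char) × List Char) (stB : List PvOp × Option Int × Nat) : Prop :=
  stA.1 = stB.1.flatMap (pvRender max paras) ∧
  match stB.2.1 with
  | none => stA.2 = []
  | some s => ∃ sn : Nat, s = (sn : Int) ∧
      stA.2 = PySem.Chars.join [' '] (paras.drop sn) ∧ stA.2 ≠ [] ∧ pvGood stA.2

theorem pvStepBoth (max : Int) (hmax : 1 ≤ max) (paras : List (List Char)) (k : Nat)
    (hk : k < paras.length) (p : List Char) (hp : paras[k]? = some p)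
    (hgp : pvGood p ∧ p ≠ []) (stA : List (List Char) × List Char)
    (stB : List PvOp × Option Int × Nat) (h : pvInvB max paras k stA stB) :
    pvInvB max paras (k + 1) (pvStepA max stA p)
      (pvStepPlan max stB ((k : Int), (PySem.Chars.split₀ p).length)) := by
  obtain ⟨hGp, hnep⟩ := hgp
  obtain ⟨cA, cur⟩ := stA
  obtain ⟨plan, start, total⟩ := stB
  obtain ⟨h1, h2⟩ := h
  simp only at h1 h2
  have hdropk : paras.drop k = p :: paras.drop (k + 1) := by
    rw [List.drop_eq_getElem_cons hk]
    have : paras[k] = p := by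
      have := List.getElem?_eq_getElem hk
      rw [hp] at this; exact (Option.some.injEq _ _).mp this.symm
    rw [this]
  have hNewGroup : p = PySem.Chars.join [' '] ((paras.drop k).take (k + 1 - k)) := by
    rw [hdropk]
    simp [PySem.Chars.join_singleton]
  have hget : PySem.List.pyGetD paras ((k : Nat) : Int) ([] : List Char) = p := by
    rw [PySem.List.pyGetD_natCast]
    rw [List.getD_eq_getElem?_getD, hp]; rfl
  cases start with
  | none =>
    obtain ⟨hcur, htot⟩ := h2
    subst hcur htot
    have hsplit : PySem.Chars.split₀ (([] : List Char) ++ ' ' :: p) = PySem.Chars.split₀ p := by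
      rw [pvSplitAppendSpace]; rfl
    by_cases hfit : ((PySem.Chars.split₀ p).length : Int) ≤ max
    · simp only [pvStepA, pvStepPlan, hsplit, if_pos hfit, if_neg (not_lt.mpr hfit)]
      unfold pvInvB
      rw [List.nil_append, pvStripSpaceCons hGp]
      exact ⟨h1, k, rfl, by omega, hNewGroup, hnep, hGp, rfl⟩
    · have hbig : max < ((PySem.Chars.split₀ p).length : Int) := lt_of_not_ge hfit
      simp only [pvStepA, pvStepPlan, hsplit, if_neg hfit,
        if_pos (show ((PySem.Chars.split₀ p).length : Int) > max from hbig),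
        List.isEmpty_nil, if_true]
      unfold pvInvB
      refine ⟨?_, rfl, rfl⟩
      rw [pvSliceLoopEq max (by omega) _ 0 cA, h1]
      simp [pvRender, hget]
  | some s =>
    obtain ⟨sn, rfl, hsk, hcur, hne, hGc, htot⟩ := h2
    have hcurEmpty : cur.isEmpty = false := by simp [List.isEmpty_iff, hne]
    have hsplit : (PySem.Chars.split₀ (cur ++ ' ' :: p)).length
        = total + (PySem.Chars.split₀ p).length := by
      rw [pvSplitAppendSpace, List.length_append, htot]
    have hrg : pvRender max paras (PvOp.group ((sn : Nat) : Int) ((k : Nat) : Int)) = [cur] := by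
      simp only [pvRender]
      rw [PySem.List.slice_natCast, ← hcur]
    by_cases hbig : max < ((PySem.Chars.split₀ p).length : Int)
    · have hnofit : ¬ ((PySem.Chars.split₀ (cur ++ ' ' :: p)).length : Int) ≤ max := by
        rw [hsplit]; push_cast; omega
      simp only [pvStepA, pvStepPlan, if_neg hnofit, hcurEmpty, Bool.false_eq_true, if_false,
        if_pos (show ((PySem.Chars.split₀ p).length : Int) > max from hbig),
        if_neg (not_le.mpr hbig)]
      unfold pvInvB
      refine ⟨?_, rfl, rfl⟩
      rw [pvSliceLoopEq max (by omega) _ 0, h1, pvStripOfGood hGc]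
      simp [pvRender, hget, PySem.List.slice_natCast, ← hcur]
    · have hsmall : ((PySem.Chars.split₀ p).length : Int) ≤ max := not_lt.mp hbig
      by_cases hfit : ((total + (PySem.Chars.split₀ p).length : Nat) : Int) ≤ max
      · have hfitA : ((PySem.Chars.split₀ (cur ++ ' ' :: p)).length : Int) ≤ max := by
          rw [hsplit]; exact_mod_cast hfit
        simp only [pvStepA, pvStepPlan, if_pos hfitA, if_neg (not_lt.mpr hsmall), if_pos hfit]
        have hprev : (paras.drop sn).take (k - sn) ≠ [] := by
          intro he
          rw [he] at hcur
          exact hne (by simpa using hcur)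
        have htake : (paras.drop sn).take (k + 1 - sn)
            = (paras.drop sn).take (k - sn) ++ [p] := by
          have h1' : k + 1 - sn = (k - sn) + 1 := by omega
          rw [h1', List.take_succ]
          have hix : (paras.drop sn)[k - sn]? = some p := by
            rw [List.getElem?_drop]
            have : sn + (k - sn) = k := by omega
            rw [this, hp]
          rw [hix]; rfl
        have hglue := pvStripGlue hGc hne hGp hnep
        unfold pvInvB
        rw [hglue]
        refine ⟨h1, sn, rfl, by omega, ?_, by simp, ?_, ?_⟩
        · rw [htake, pvJoinAppendSingleton _ _ hprev, hcur]
        · rw [← hglue]; exact pvGoodStrip _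
        · rw [pvSplitAppendSpace, List.length_append, htot]
      · have hnofitA : ¬ ((PySem.Chars.split₀ (cur ++ ' ' :: p)).length : Int) ≤ max := by
          rw [hsplit]
          intro hcon
          exact hfit (by exact_mod_cast hcon)
        simp only [pvStepA, pvStepPlan, if_neg hnofitA, hcurEmpty, Bool.false_eq_true, if_false,
          if_pos hsmall, if_neg (not_lt.mpr hsmall), if_neg hfit]
        unfold pvInvB
        refine ⟨?_, k, rfl, by omega, hNewGroup, hnep, hGp, rfl⟩
        rw [h1, pvStripOfGood hGc]
        simp [pvRender, PySem.List.slice_natCast, ← hcur]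

theorem pvFoldBoth (max : Int) (hmax : 1 ≤ max) (paras : List (List Char))
    (hg : ∀ p ∈ paras, pvGood p ∧ p ≠ []) :
    ∀ (suf : List (List Char)) (k : Nat), paras.drop k = suf →
      ∀ stA stB, pvInvB max paras k stA stB →
        pvInvEnd max paras (suf.foldl (pvStepA max) stA)
          ((PySem.List.enumerate (suf.map (fun p => (PySem.Chars.split₀ p).length)) (k : Int)).foldl
            (pvStepPlan max) stB) := by
  intro suf
  induction suf with
  | nil =>
    intro k hdrop stA stB h
    obtain ⟨h1, h2⟩ := h
    have hlen : paras.length ≤ k := List.drop_eq_nil_iff.mp hdrop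
    simp only [List.map_nil, PySem.List.enumerate_nil, List.foldl_nil]
    unfold pvInvEnd
    refine ⟨h1, ?_⟩
    cases hs : stB.2.1 with
    | none => rw [hs] at h2; exact h2.1
    | some s =>
      rw [hs] at h2
      obtain ⟨sn, rfl, hsk, hcur, hne, hGc, -⟩ := h2
      refine ⟨sn, rfl, ?_, hne, hGc⟩
      rw [hcur, List.take_of_length_le (by rw [List.length_drop]; omega)]
  | cons p rest ih =>
    intro k hdrop stA stB h
    have hk : k < paras.length := by
      by_contra hge
      have hnil : paras.drop k = [] := List.drop_eq_nil_iff.mpr (by omega)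
      rw [hnil] at hdrop
      cases hdrop
    have hp : paras[k]? = some p := by
      have h0 := congrArg (fun l => l[0]?) hdrop
      simpa [List.getElem?_drop] using h0
    have hrest : paras.drop (k + 1) = rest := by
      have ht := congrArg List.tail hdrop
      simpa [List.tail_drop] using ht
    have hmem : p ∈ paras := by
      have : p ∈ paras.drop k := by rw [hdrop]; exact List.mem_cons_self ..
      exact List.mem_of_mem_drop this
    simp only [List.map_cons, PySem.List.enumerate_cons, List.foldl_cons]
    have hstep := pvStepBoth max hmax paras k hk p hp (hg p hmem) stA stB h
    have hcast : (k : Int) + 1 = ((k + 1 : Nat) : Int) := by push_cast; ring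
    rw [hcast]
    exact ih (k + 1) hrest _ _ hstep

-- ===== VERDICT (by name: the statement is the Claim_ definition above) =====
theorem fine_grained_paragraph_chunker_spec : Claim_equal_fine_grained_paragraph_chunker := by
  intro text max hdom hpre
  unfold Spec_fine_grained_paragraph_chunker
  simp only [fine_grained_paragraph_chunker, fine_grained_paragraph_chunker_alt,
    List.filter_map, Function.comp_def]
  rcases hpre with hmax | hempty
  case inr =>
    rw [hempty]
    simp [PySem.List.enumerate_nil, pvMatFold]
  set paras := ((PySem.Chars.splitOn text.toList ['\n', '\n']).filter
      (fun p => !(PySem.Chars.strip p).isEmpty)).map PySem.Chars.strip with hparas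
  have hg : ∀ p ∈ paras, pvGood p ∧ p ≠ [] := by
    intro p hp
    rw [hparas] at hp
    simp only [List.mem_map, List.mem_filter] at hp
    obtain ⟨q, ⟨-, hq⟩, rfl⟩ := hp
    exact ⟨pvGoodStrip q, by simpa [List.isEmpty_iff] using hq⟩
  have hinv0 : pvInvB max paras 0 ([], []) ([], none, 0) := ⟨by simp, rfl, rfl⟩
  have hmain := pvFoldBoth max hmax paras hg paras 0 (by simp : paras.drop 0 = paras) ([], []) ([], none, 0) hinv0
  rw [show ((0 : Nat) : Int) = (0 : Int) by simp] at hmain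
  obtain ⟨h1, h2⟩ := hmain
  rw [pvMatFold]
  cases hs : ((PySem.List.enumerate (paras.map fun p => (PySem.Chars.split₀ p).length) 0).foldl
      (pvStepPlan max) ([], none, 0)).2.1 with
  | none =>
    rw [hs] at h2
    rw [if_pos (List.isEmpty_iff.mpr h2), h1]
    simp
  | some s =>
    rw [hs] at h2
    obtain ⟨sn, rfl, hcur, hne, hGc⟩ := h2
    rw [if_neg (by simpa [List.isEmpty_iff] using hne), pvStripOfGood hGc, h1]
    simp only [List.flatMap_append, List.nil_append]
    congr 1
    simp only [pvRender, List.flatMap_cons, List.flatMap_nil, List.append_nil]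
    rw [PySem.List.slice_natCast, show paras.length - sn = (paras.drop sn).length from (List.length_drop ..).symm,
      List.take_length, hcur]
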